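-- pv_equiv track=rewrite | github.com/iberdiev/coding_for_fun | Rummy card game implementation/script.py | valid_number_of_moves
-- ===== SOURCE A (Python) =====
-- def valid_number_of_moves(play_history, active_player):
--     queue_str = ''.join([str(play[0]) for play in play_history]) + str(active_player)
--     current = queue_str[0]
--     count_current = 1
--     for i in range(len(queue_str) - 1):
--         if queue_str[i + 1] == current:
--             count_current += 1
--             if count_current == 7:
--                 return False
--         else:
--             count_current = 1
--             current = queue_str[i + 1]
--     return True
-- ===== SOURCE B (Python) =====
-- def valid_number_of_moves(play_history, active_player):
--     s = ''.join([str(play[0]) for play in play_history]) + str(active_player)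
--     return not any(c * 7 in s for c in set(s))
-- ===== Notes on version B (the rewrite author's own statement) =====
-- stated objective: simpler
-- what changed: B drops A's stateful counter scan entirely: it checks, for each distinct character of the queue string, whether that character repeated 7 times occurs as a substring (c*7 in s), i.e. run detection via substring search per distinct symbol instead of a character-by-character state machine.
import Mathlib
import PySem

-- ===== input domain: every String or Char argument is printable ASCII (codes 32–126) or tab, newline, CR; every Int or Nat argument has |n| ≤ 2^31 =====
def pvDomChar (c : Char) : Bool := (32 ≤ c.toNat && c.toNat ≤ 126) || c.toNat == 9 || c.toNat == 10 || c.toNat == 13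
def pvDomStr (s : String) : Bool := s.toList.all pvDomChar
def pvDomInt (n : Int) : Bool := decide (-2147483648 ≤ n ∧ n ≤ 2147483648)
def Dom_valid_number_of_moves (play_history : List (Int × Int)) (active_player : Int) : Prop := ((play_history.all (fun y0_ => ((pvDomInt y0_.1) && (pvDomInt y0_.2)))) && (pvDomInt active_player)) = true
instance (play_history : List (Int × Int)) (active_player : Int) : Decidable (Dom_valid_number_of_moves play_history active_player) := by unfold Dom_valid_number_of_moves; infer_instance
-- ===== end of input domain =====

-- B replaces A's char-by-char counter state machine by a stateless check: for each distinct
-- character of the queue string, is that character repeated 7 times a substring? (objective: simpler)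

-- ===== PORT A =====
-- A's for-loop over queue_str[i+1] for i in range(len-1), carrying (current, count_current)
def loopA : List Char → Char → Nat → Bool
  | [], _, _ => true
  | c :: rest, cur, cnt =>
    if c == cur then
      if cnt + 1 == 7 then false else loopA rest cur (cnt + 1)
    else
      loopA rest c 1

def valid_number_of_moves (play_history : List (Int × Int)) (active_player : Int) : Bool :=
  -- queue_str[0] / the scan from index 1: str(active_player) is nonempty, so the [] branch is unreachable
  match PySem.Chars.join [] (play_history.map (fun play => PySem.Int.toChars play.1))
      ++ PySem.Int.toChars active_player with
  | [] => true
  | current :: rest => loopA rest current 1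

-- ===== PORT B =====
-- not any(c * 7 in s for c in set(s)); set iteration consumed by `any`, so order-independent
def valid_number_of_moves_alt (play_history : List (Int × Int)) (active_player : Int) : Bool :=
  let s := PySem.Chars.join [] (play_history.map (fun play => PySem.Int.toChars play.1))
      ++ PySem.Int.toChars active_player
  ! (PySem.Set.ofList s).any (fun c => PySem.Chars.isIn (List.replicate 7 c) s)

-- ===== PRECONDITION & SPEC =====
def Spec_valid_number_of_moves (play_history : List (Int × Int)) (active_player : Int) (out : Bool) : Prop := out = valid_number_of_moves_alt play_history active_player
instance (play_history : List (Int × Int)) (active_player : Int) (out : Bool) : Decidable (Spec_valid_number_of_moves play_history active_player out) := by unfold Spec_valid_number_of_moves; infer_instance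

-- ===== CLAIM (what is proved, stated in full; the proofs are below) =====
def Claim_equal_valid_number_of_moves : Prop := ∀ (play_history : List (Int × Int)) (active_player : Int), Dom_valid_number_of_moves play_history active_player → Spec_valid_number_of_moves play_history active_player (valid_number_of_moves play_history active_player)

-- ===== LEMMAS AND PROOFS =====

-- a 7-repetition infix of a cur-run shorter than 7 is impossible
lemma no_rep7_of_replicate_lt (cur e : Char) (cnt : Nat) (h7 : cnt < 7)
    (h : List.replicate 7 e <:+: List.replicate cnt cur) : False := by
  have := h.sublist.length_le
  simp [List.length_replicate] at this
  omega

-- skipping a maximal short run: a 7-run in (cur^cnt ++ d::rest) with d ≠ cur lives in d::rest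
lemma rep7_skip_run (cur d : Char) (cnt : Nat) (rest : List Char)
    (h7 : cnt < 7) (hne : d ≠ cur) :
    (∃ e, List.replicate 7 e <:+: List.replicate cnt cur ++ d :: rest) ↔
    (∃ e, List.replicate 7 e <:+: d :: rest) := by
  constructor
  · rintro ⟨e, u, v, h⟩
    rw [List.append_assoc] at h
    by_cases hu : cnt ≤ u.length
    · refine ⟨e, u.drop cnt, v, ?_⟩
      have := congrArg (List.drop cnt) h
      rw [List.drop_append_of_le_length hu] at this
      rw [show (List.replicate cnt cur ++ d :: rest).drop cnt
            = ((List.replicate cnt cur).drop (List.replicate cnt cur).length) ++ d :: rest from by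
          rw [List.drop_append_of_le_length (by simp)]; simp] at this
      simpa [List.append_assoc] using this
    · exfalso
      have hu' : u.length < cnt := by omega
      -- e = cur: position u.length lies inside the cur-run and starts the 7-run
      have hL : (u ++ (List.replicate 7 e ++ v))[u.length]? = some e := by
        rw [List.getElem?_append_right (Nat.le_refl _), Nat.sub_self]
        rw [List.getElem?_append_left (by simp), List.getElem?_replicate, if_pos (by omega)]
      have hR : (List.replicate cnt cur ++ d :: rest)[u.length]? = some cur := by
        rw [List.getElem?_append_left (by simpa using hu')]
        simp [hu']
      rw [h] at hL
      have he1 : e = cur := Option.some_inj.mp (hL.symm.trans hR)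
      -- e = d: position cnt lies inside the 7-run and holds d
      have hL2 : (u ++ (List.replicate 7 e ++ v))[cnt]? = some e := by
        rw [List.getElem?_append_right (by omega : u.length ≤ cnt)]
        rw [List.getElem?_append_left (by simpa using (by omega : cnt - u.length < 7))]
        rw [List.getElem?_replicate, if_pos (by omega)]
      have hR2 : (List.replicate cnt cur ++ d :: rest)[cnt]? = some d := by
        rw [List.getElem?_append_right (by simp)]
        simp
      rw [h] at hL2
      have he2 : e = d := Option.some_inj.mp (hL2.symm.trans hR2)
      exact hne (he2 ▸ he1)
  · rintro ⟨e, he⟩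
    exact ⟨e, he.trans ((List.suffix_append _ _).isInfix)⟩

-- invariant of A's scan: with cnt preceding copies of cur, failure = some 7-run in cur^cnt ++ l
lemma loopA_false_iff (l : List Char) : ∀ (cur : Char) (cnt : Nat), cnt < 7 →
    (loopA l cur cnt = false ↔ ∃ e, List.replicate 7 e <:+: List.replicate cnt cur ++ l) := by
  induction l with
  | nil =>
    intro cur cnt h7
    simp only [loopA, List.append_nil]
    constructor
    · intro h; cases h
    · rintro ⟨e, he⟩; exact absurd he (fun he => no_rep7_of_replicate_lt cur e cnt h7 he)
  | cons d rest ih =>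
    intro cur cnt h7
    by_cases hd : d = cur
    · subst hd
      have hrw : List.replicate cnt d ++ d :: rest = List.replicate (cnt + 1) d ++ rest := by
        rw [List.replicate_succ']; simp
      simp only [loopA, beq_self_eq_true, if_true, hrw]
      by_cases h6 : cnt + 1 = 7
      · have hc : cnt = 6 := by omega
        subst hc
        constructor
        · intro _; exact ⟨d, [], rest, by simp⟩
        · intro _; simp
      · have hb : (cnt + 1 == 7) = false := beq_eq_false_iff_ne.mpr h6
        simp only [hb, Bool.false_eq_true, if_false]
        exact ih d (cnt + 1) (by omega)
    · have hbeq : (d == cur) = false := by simp [hd]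
      simp only [loopA, hbeq, Bool.false_eq_true, if_false]
      rw [ih d 1 (by omega)]
      rw [show List.replicate 1 d ++ rest = d :: rest by simp]
      exact (rep7_skip_run cur d cnt rest h7 hd).symm

-- B's any-over-set is existence of a 7-run infix
lemma any_iff (s : List Char) :
    (PySem.Set.ofList s).any (fun c => PySem.Chars.isIn (List.replicate 7 c) s) = true
      ↔ ∃ e, List.replicate 7 e <:+: s := by
  rw [List.any_eq_true]
  constructor
  · rintro ⟨e, _, he⟩
    exact ⟨e, (PySem.Chars.isIn_iff_infix _ _).mp he⟩
  · rintro ⟨e, he⟩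
    refine ⟨e, ?_, (PySem.Chars.isIn_iff_infix _ _).mpr he⟩
    have : e ∈ List.replicate 7 e := by simp
    exact (PySem.Set.mem_ofList _ _).mpr (he.sublist.subset this)

-- ===== VERDICT (by name: the statement is the Claim_ definition above) =====
theorem valid_number_of_moves_spec : Claim_equal_valid_number_of_moves := by
  intro play_history active_player _
  unfold Spec_valid_number_of_moves valid_number_of_moves valid_number_of_moves_alt
  cases h : PySem.Chars.join [] (play_history.map (fun play => PySem.Int.toChars play.1))
      ++ PySem.Int.toChars active_player with
  | nil => rfl
  | cons c rest =>
    show loopA rest c 1 = !(PySem.Set.ofList (c :: rest)).any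
        (fun x => PySem.Chars.isIn (List.replicate 7 x) (c :: rest))
    have hiff := loopA_false_iff rest c 1 (by omega)
    simp only [List.replicate_one, List.singleton_append] at hiff
    by_cases hx : ∃ e, List.replicate 7 e <:+: c :: rest
    · rw [hiff.mpr hx, (any_iff (c :: rest)).mpr hx]
      rfl
    · have hA : loopA rest c 1 = true := by
        rcases Bool.eq_false_or_eq_true (loopA rest c 1) with hl | hl
        · exact hl
        · exact absurd (hiff.mp hl) hx
      have hB : (PySem.Set.ofList (c :: rest)).any
          (fun x => PySem.Chars.isIn (List.replicate 7 x) (c :: rest)) = false := by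
        rcases Bool.eq_false_or_eq_true ((PySem.Set.ofList (c :: rest)).any
            (fun x => PySem.Chars.isIn (List.replicate 7 x) (c :: rest))) with hb | hb
        · exact absurd ((any_iff _).mp hb) hx
        · exact hb
      rw [hA, hB]
      rfl
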